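-- pv_equiv track=rewrite | github.com/ehavugi/english2kinyarwanda | code/ubuke_ubwinshi.py | ubwinshi
-- ===== SOURCE A (Python) =====
-- def word_in_kinyarwanda(word):
-- 		return False
--
-- def ubwinshi(ijambo):
-- 	"""should take a word (ijambo) in singular and return its plural form"""
-- 	if ijambo=="wa":
-- 		return "ya"  ##Or ba (depending class of nearby word)
-- 	if ijambo.startswith("si"):
-- 		return "si"+ubwinshi(ijambo[2:])
-- 	if ijambo.startswith("ubw") or ijambo.startswith("ubu"):
-- 		## ubwoko ==> amoko, ubwato==>amato,etc
-- 		return "ama"+ijambo[1:]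
-- 	if ijambo.startswith("umu") or ijambo.startswith("umw"):
-- 		##umwana==> abana, umwami==>abami
-- 		## umunyeshuri==>abanyeshuri
-- 		ijambo1="aba"+ijambo[3:]
-- 		ijambo2="imi"+ijambo[3:]
-- 		if word_in_kinyarwanda(ijambo2):
-- 			return ijambo2
-- 		else: return ijambo1
-- 	if ijambo.startswith("igi") or ijambo.startswith("iki"):
--
-- 		##Igikorwa==>ibikorwa, igiti ==>ibiti
-- 		#igice ==> ibice
-- 		#igiti ==>ibiti
-- 		return "ibi"+ijambo[3:]
-- 	if ijambo.startswith("icya"):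
-- 		return "ibya" +ijambo[4:]
--
-- 	if ijambo.startswith("uku"):
-- 		return "ama"+ijambo[3:]
-- 	if ijambo.startswith("ak"):
-- 		return "utu"+ijambo[3:]
-- 	if ijambo.startswith("in"):
-- 		return ijambo
-- 	if ijambo.startswith("uru"):
-- 		return "in"+ijambo[3:]
-- 	if ijambo.startswith('ya'):
-- 		return "za"+ijambo[2:]
-- 	if ijambo.startswith("wa"):
-- 		return "ba"+ijambo[2:]
-- 	if ijambo[0] in ["ioeau"]:
-- 		return ijambo[0]+ubwinshi(ijambo[0:])
-- 	if ijambo.startswith("i"):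
-- 		return "ama"+ijambo[1:]
-- 	if ijambo.startswith("u"):
-- 		return "mu"+ijambo[1:]
-- 	if ijambo.startswith("n"):
-- 		return "tu"+ijambo[1:]
-- 	if ijambo.startswith("ara"):
-- 		return "bara"+ijambo[3:]
-- 	if ijambo.startswith("ura"):
-- 		return "mura"+ijambo[3:]
-- 	if ijambo.startswith("nda"):
-- 		return "tura"+ijambo[3:]
-- 	if ijambo[0] in ["ioeau"]:
-- 		return ijambo[0]+ubwinshi(ijambo[0:])
--
-- 	else:
-- 		return ""
-- ===== SOURCE B (Python) =====
-- # Table-driven rewrite: ordered rule table (prefix, replacement, strip) + exact "wa"->"ya",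
-- # with the leading "si" pairs peeled iteratively instead of by recursion.
-- RULES = [
--     ("ubw", "ama", 1), ("ubu", "ama", 1),
--     ("umu", "aba", 3), ("umw", "aba", 3),
--     ("igi", "ibi", 3), ("iki", "ibi", 3),
--     ("icya", "ibya", 4),
--     ("uku", "ama", 3),
--     ("ak", "utu", 3),
--     ("in", "in", 2),
--     ("uru", "in", 3),
--     ("ya", "za", 2), ("wa", "ba", 2),
--     ("i", "ama", 1), ("u", "mu", 1), ("n", "tu", 1),
--     ("ara", "bara", 3), ("ura", "mura", 3), ("nda", "tura", 3),
-- ]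
--
-- def ubwinshi(ijambo):
--     """should take a word (ijambo) in singular and return its plural form"""
--     k = 0
--     while ijambo.startswith("si"):
--         ijambo = ijambo[2:]
--         k += 1
--     if ijambo == "wa":
--         return "si" * k + "ya"
--     for prefix, repl, strip in RULES:
--         if ijambo.startswith(prefix):
--             return "si" * k + repl + ijambo[strip:]
--     return "si" * k
-- ===== Notes on version B (the rewrite author's own statement) =====
-- stated objective: idiomatic
-- what changed: The if-elif cascade with recursion on the 'si' prefix is replaced by an ordered (prefix, replacement, strip) rule table scanned once, with leading 'si' pairs peeled off iteratively and re-prepended.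
-- outside the precondition, e.g. on ubwinshi('si'): A raises IndexError, B returns 'si'
import Mathlib
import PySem

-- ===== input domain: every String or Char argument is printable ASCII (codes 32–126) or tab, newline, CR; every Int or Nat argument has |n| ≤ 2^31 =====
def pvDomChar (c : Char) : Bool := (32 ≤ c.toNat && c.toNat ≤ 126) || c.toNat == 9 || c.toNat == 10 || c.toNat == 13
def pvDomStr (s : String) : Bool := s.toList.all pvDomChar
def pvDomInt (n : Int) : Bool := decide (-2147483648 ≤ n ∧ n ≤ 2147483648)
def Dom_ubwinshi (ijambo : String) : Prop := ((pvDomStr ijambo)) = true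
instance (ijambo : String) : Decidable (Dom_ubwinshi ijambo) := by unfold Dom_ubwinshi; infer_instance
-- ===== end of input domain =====

-- B replaces A's if-chain with an ordered (prefix, replacement, strip) rule table scanned once,
-- peeling leading "si" pairs iteratively instead of recursing (objective: idiomatic/data-driven).
-- A raises IndexError exactly on "si"*k (k ≥ 0, incl. ""); those inputs are outside Pre_.

-- ===== PORT A =====
def wordInKinyarwanda (_word : List Char) : Bool := false

def ubwinshiChars (l : List Char) : List Char :=
  if l = ['w','a'] then ['y','a']
  else if hsi : List.isPrefixOf ['s','i'] l then
    ['s','i'] ++ ubwinshiChars (l.drop 2)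
  else if List.isPrefixOf ['u','b','w'] l || List.isPrefixOf ['u','b','u'] l then
    ['a','m','a'] ++ l.drop 1
  else if List.isPrefixOf ['u','m','u'] l || List.isPrefixOf ['u','m','w'] l then
    let ijambo1 := ['a','b','a'] ++ l.drop 3
    let ijambo2 := ['i','m','i'] ++ l.drop 3
    if wordInKinyarwanda ijambo2 then ijambo2 else ijambo1
  else if List.isPrefixOf ['i','g','i'] l || List.isPrefixOf ['i','k','i'] l then
    ['i','b','i'] ++ l.drop 3
  else if List.isPrefixOf ['i','c','y','a'] l then ['i','b','y','a'] ++ l.drop 4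
  else if List.isPrefixOf ['u','k','u'] l then ['a','m','a'] ++ l.drop 3
  else if List.isPrefixOf ['a','k'] l then ['u','t','u'] ++ l.drop 3
  else if List.isPrefixOf ['i','n'] l then l
  else if List.isPrefixOf ['u','r','u'] l then ['i','n'] ++ l.drop 3
  else if List.isPrefixOf ['y','a'] l then ['z','a'] ++ l.drop 2
  else if List.isPrefixOf ['w','a'] l then ['b','a'] ++ l.drop 2
  else
    match PySem.List.pyGet? l (0 : Int) with
    | none => []   -- Python raises IndexError here (ijambo[0] on ""); excluded by Pre_
    | some c =>
      -- `ijambo[0] in ["ioeau"]`: a 1-char string is never the 5-char string "ioeau",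
      -- so this branch (which in Python would recurse on the SAME argument) is provably dead.
      if h1 : [c] ∈ ([['i','o','e','a','u']] : List (List Char)) then absurd h1 (by simp)
      else if List.isPrefixOf ['i'] l then ['a','m','a'] ++ l.drop 1
      else if List.isPrefixOf ['u'] l then ['m','u'] ++ l.drop 1
      else if List.isPrefixOf ['n'] l then ['t','u'] ++ l.drop 1
      else if List.isPrefixOf ['a','r','a'] l then ['b','a','r','a'] ++ l.drop 3
      else if List.isPrefixOf ['u','r','a'] l then ['m','u','r','a'] ++ l.drop 3
      else if List.isPrefixOf ['n','d','a'] l then ['t','u','r','a'] ++ l.drop 3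
      else if h2 : [c] ∈ ([['i','o','e','a','u']] : List (List Char)) then absurd h2 (by simp)
      else []
termination_by l.length
decreasing_by
  have := (List.isPrefixOf_iff_prefix.mp hsi).length_le
  simp at this ⊢; omega

def ubwinshi (ijambo : String) : String := String.ofList (ubwinshiChars ijambo.toList)

-- ===== PORT B =====
def pvRules : List (List Char × List Char × Nat) :=
  [ (['u','b','w'], ['a','m','a'], 1), (['u','b','u'], ['a','m','a'], 1),
    (['u','m','u'], ['a','b','a'], 3), (['u','m','w'], ['a','b','a'], 3),
    (['i','g','i'], ['i','b','i'], 3), (['i','k','i'], ['i','b','i'], 3),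
    (['i','c','y','a'], ['i','b','y','a'], 4),
    (['u','k','u'], ['a','m','a'], 3),
    (['a','k'], ['u','t','u'], 3),
    (['i','n'], ['i','n'], 2),
    (['u','r','u'], ['i','n'], 3),
    (['y','a'], ['z','a'], 2), (['w','a'], ['b','a'], 2),
    (['i'], ['a','m','a'], 1), (['u'], ['m','u'], 1), (['n'], ['t','u'], 1),
    (['a','r','a'], ['b','a','r','a'], 3), (['u','r','a'], ['m','u','r','a'], 3),
    (['n','d','a'], ['t','u','r','a'], 3) ]

-- first matching rule wins; no match → ""
def applyRules : List (List Char × List Char × Nat) → List Char → List Char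
  | [], _ => []
  | (p, r, s) :: rest, l => if List.isPrefixOf p l then r ++ l.drop s else applyRules rest l

-- peel leading "si" pairs, counting them
def siPeel : List Char → Nat × List Char
  | 's' :: 'i' :: r => let pr := siPeel r; (pr.1 + 1, pr.2)
  | l => (0, l)

def ubwinshiAltChars (l : List Char) : List Char :=
  let pr := siPeel l
  (List.replicate pr.1 (['s','i'] : List Char)).flatten ++
    (if pr.2 = ['w','a'] then ['y','a'] else applyRules pvRules pr.2)

def ubwinshi_alt (ijambo : String) : String := String.ofList (ubwinshiAltChars ijambo.toList)

-- ===== PRECONDITION & SPEC =====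
-- A raises IndexError exactly on words of the form "si" repeated k ≥ 0 times (including "");
-- Pre_ excludes exactly those.
def siPow : List Char → Bool
  | [] => true
  | 's' :: 'i' :: r => siPow r
  | _ => false

def Pre_ubwinshi (ijambo : String) : Prop := siPow ijambo.toList = false
instance (ijambo : String) : Decidable (Pre_ubwinshi ijambo) := by unfold Pre_ubwinshi; infer_instance
def pvWitness_ubwinshi : String := "umwana"

def Spec_ubwinshi (ijambo : String) (out : String) : Prop := out = ubwinshi_alt ijambo
instance (ijambo : String) (out : String) : Decidable (Spec_ubwinshi ijambo out) := by unfold Spec_ubwinshi; infer_instance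

-- ===== CLAIM (what is proved, stated in full; the proofs are below) =====
def Claim_equal_ubwinshi : Prop := ∀ (ijambo : String), Dom_ubwinshi ijambo → Pre_ubwinshi ijambo → Spec_ubwinshi ijambo (ubwinshi ijambo)

-- ===== LEMMAS AND PROOFS =====

theorem ar_pos (p r : List Char) (s : Nat) (rs : List (List Char × List Char × Nat))
    (l : List Char) (h : List.isPrefixOf p l = true) :
    applyRules ((p, r, s) :: rs) l = r ++ l.drop s := by simp [applyRules, h]

theorem ar_neg (p r : List Char) (s : Nat) (rs : List (List Char × List Char × Nat))
    (l : List Char) (h : ¬ List.isPrefixOf p l = true) :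
    applyRules ((p, r, s) :: rs) l = applyRules rs l := by simp [applyRules, h]

theorem siPeel_no_si (l : List Char) (hsi : ¬ List.isPrefixOf ['s','i'] l = true) :
    siPeel l = (0, l) := by
  rw [siPeel.eq_def]
  split
  · rename_i r; simp [List.isPrefixOf] at hsi
  · rfl

theorem alt_si (t : List Char) :
    ubwinshiAltChars ('s' :: 'i' :: t) = 's' :: 'i' :: ubwinshiAltChars t := by
  rw [ubwinshiAltChars, ubwinshiAltChars, siPeel]
  simp [List.replicate_succ]

set_option maxHeartbeats 4000000 in
set_option maxRecDepth 4096 in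
theorem key_lemma (l : List Char) (h : siPow l = false) :
    ubwinshiChars l = ubwinshiAltChars l := by
  by_cases hsi : List.isPrefixOf ['s','i'] l
  · have heq : ['s','i'] ++ l.drop 2 = l :=
      List.prefix_iff_eq_append.mp (List.isPrefixOf_iff_prefix.mp hsi)
    have hne : ¬ (l = ['w','a']) := by
      intro hco; subst hco; simp at heq
    have hr : siPow (l.drop 2) = false := by
      rw [← heq] at h; simpa [siPow] using h
    have ih := key_lemma (l.drop 2) hr
    have halt : ubwinshiAltChars l = 's' :: 'i' :: ubwinshiAltChars (l.drop 2) := by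
      conv_lhs => rw [← heq]
      exact alt_si _
    rw [ubwinshiChars, if_neg hne, dif_pos hsi, halt, ih]
    rfl
  · have hpeel : siPeel l = (0, l) := siPeel_no_si l hsi
    by_cases hwa : l = ['w','a']
    · subst hwa
      rw [ubwinshiChars, ubwinshiAltChars, hpeel]
      simp
    · have hrhs : ubwinshiAltChars l = applyRules pvRules l := by
        rw [ubwinshiAltChars, hpeel]
        simp [hwa]
      rcases l with _ | ⟨c, rest⟩
      · simp [siPow] at h
      · rw [hrhs, ubwinshiChars, if_neg hwa, dif_neg hsi]
        simp only [pvRules]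
        by_cases h1 : List.isPrefixOf ['u','b','w'] (c :: rest) = true
        · rw [ar_pos _ _ _ _ _ h1, if_pos (by simp [h1])]
        · rw [ar_neg _ _ _ _ _ h1]
          by_cases h2 : List.isPrefixOf ['u','b','u'] (c :: rest) = true
          · rw [ar_pos _ _ _ _ _ h2, if_pos (by simp [h2])]
          · rw [ar_neg _ _ _ _ _ h2, if_neg (by simp [h1, h2])]
            by_cases h3 : List.isPrefixOf ['u','m','u'] (c :: rest) = true
            · rw [ar_pos _ _ _ _ _ h3, if_pos (by simp [h3])]
              simp [wordInKinyarwanda]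
            · rw [ar_neg _ _ _ _ _ h3]
              by_cases h4 : List.isPrefixOf ['u','m','w'] (c :: rest) = true
              · rw [ar_pos _ _ _ _ _ h4, if_pos (by simp [h4])]
                simp [wordInKinyarwanda]
              · rw [ar_neg _ _ _ _ _ h4, if_neg (by simp [h3, h4])]
                by_cases h5 : List.isPrefixOf ['i','g','i'] (c :: rest) = true
                · rw [ar_pos _ _ _ _ _ h5, if_pos (by simp [h5])]
                · rw [ar_neg _ _ _ _ _ h5]
                  by_cases h6 : List.isPrefixOf ['i','k','i'] (c :: rest) = true
                  · rw [ar_pos _ _ _ _ _ h6, if_pos (by simp [h6])]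
                  · rw [ar_neg _ _ _ _ _ h6, if_neg (by simp [h5, h6])]
                    by_cases h7 : List.isPrefixOf ['i','c','y','a'] (c :: rest) = true
                    · rw [ar_pos _ _ _ _ _ h7, if_pos h7]
                    · rw [ar_neg _ _ _ _ _ h7, if_neg h7]
                      by_cases h8 : List.isPrefixOf ['u','k','u'] (c :: rest) = true
                      · rw [ar_pos _ _ _ _ _ h8, if_pos h8]
                      · rw [ar_neg _ _ _ _ _ h8, if_neg h8]
                        by_cases h9 : List.isPrefixOf ['a','k'] (c :: rest) = true
                        · rw [ar_pos _ _ _ _ _ h9, if_pos h9]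
                        · rw [ar_neg _ _ _ _ _ h9, if_neg h9]
                          by_cases h10 : List.isPrefixOf ['i','n'] (c :: rest) = true
                          · rw [ar_pos _ _ _ _ _ h10, if_pos h10]
                            exact (List.prefix_iff_eq_append.mp (List.isPrefixOf_iff_prefix.mp h10)).symm
                          · rw [ar_neg _ _ _ _ _ h10, if_neg h10]
                            by_cases h11 : List.isPrefixOf ['u','r','u'] (c :: rest) = true
                            · rw [ar_pos _ _ _ _ _ h11, if_pos h11]
                            · rw [ar_neg _ _ _ _ _ h11, if_neg h11]
                              by_cases h12 : List.isPrefixOf ['y','a'] (c :: rest) = true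
                              · rw [ar_pos _ _ _ _ _ h12, if_pos h12]
                              · rw [ar_neg _ _ _ _ _ h12, if_neg h12]
                                by_cases h13 : List.isPrefixOf ['w','a'] (c :: rest) = true
                                · rw [ar_pos _ _ _ _ _ h13, if_pos h13]
                                · rw [ar_neg _ _ _ _ _ h13, if_neg h13]
                                  simp only [PySem.List.pyGet?_zero_cons]
                                  rw [dif_neg (show ¬ ([c] ∈ ([['i','o','e','a','u']] : List (List Char))) by simp)]
                                  by_cases h14 : List.isPrefixOf ['i'] (c :: rest) = true
                                  · rw [ar_pos _ _ _ _ _ h14, if_pos h14]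
                                  · rw [ar_neg _ _ _ _ _ h14, if_neg h14]
                                    by_cases h15 : List.isPrefixOf ['u'] (c :: rest) = true
                                    · rw [ar_pos _ _ _ _ _ h15, if_pos h15]
                                    · rw [ar_neg _ _ _ _ _ h15, if_neg h15]
                                      by_cases h16 : List.isPrefixOf ['n'] (c :: rest) = true
                                      · rw [ar_pos _ _ _ _ _ h16, if_pos h16]
                                      · rw [ar_neg _ _ _ _ _ h16, if_neg h16]
                                        by_cases h17 : List.isPrefixOf ['a','r','a'] (c :: rest) = true
                                        · rw [ar_pos _ _ _ _ _ h17, if_pos h17]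
                                        · rw [ar_neg _ _ _ _ _ h17, if_neg h17]
                                          by_cases h18 : List.isPrefixOf ['u','r','a'] (c :: rest) = true
                                          · rw [ar_pos _ _ _ _ _ h18, if_pos h18]
                                          · rw [ar_neg _ _ _ _ _ h18, if_neg h18]
                                            by_cases h19 : List.isPrefixOf ['n','d','a'] (c :: rest) = true
                                            · rw [ar_pos _ _ _ _ _ h19, if_pos h19]
                                            · rw [ar_neg _ _ _ _ _ h19, if_neg h19]
                                              rw [dif_neg (show ¬ ([c] ∈ ([['i','o','e','a','u']] : List (List Char))) by simp)]
                                              rfl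
termination_by l.length
decreasing_by
  have := (List.isPrefixOf_iff_prefix.mp hsi).length_le
  simp only [List.length_cons, List.length_nil, List.length_drop] at this ⊢
  omega

-- ===== VERDICT (by name: the statement is the Claim_ definition above) =====
theorem ubwinshi_spec : Claim_equal_ubwinshi := by
  intro s _ hpre
  unfold Spec_ubwinshi ubwinshi ubwinshi_alt
  exact congrArg String.ofList (key_lemma s.toList hpre)
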